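-- pv_equiv track=rewrite | github.com/deysantanu84/python-portfolio | problemSolving/trees/checkForBSTWithOneChild.py | solve
-- ===== SOURCE A (Python) =====
-- def solve(A):
--     N = len(A)
--
--     if A[N - 1] > A[N - 2]:
--         maxVal = A[N - 1]
--         minVal = A[N - 2]
--     else:
--         maxVal = A[N - 2]
--         minVal = A[N - 1]
--
--     for i in range(N - 3, -1, -1):
--         if A[i] < minVal:
--             minVal = A[i]
--         elif A[i] > maxVal:
--             maxVal = A[i]
--         else:
--             return "NO"
--
--     return "YES"
-- ===== SOURCE B (Python) =====
-- def solve(A):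
--     n = len(A)
--     # suffix tables: after the reverse, sufMin[k] = min(A[k:]), sufMax[k] = max(A[k:])
--     sufMin = [A[-1]]
--     sufMax = [A[-1]]
--     for x in reversed(A[:-1]):
--         sufMin.append(min(x, sufMin[-1]))
--         sufMax.append(max(x, sufMax[-1]))
--     sufMin.reverse()
--     sufMax.reverse()
--     for i in range(n - 2):
--         if sufMin[i + 1] <= A[i] <= sufMax[i + 1]:
--             return "NO"
--     return "YES"
-- ===== Notes on version B (the rewrite author's own statement) =====
-- stated objective: alternative
-- what changed: Replaces A's single right-to-left scan with a running min/max window and early return by precomputing suffix-min and suffix-max tables in one backward pass and then checking each position against the table in a separate forward pass.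
import Mathlib
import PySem

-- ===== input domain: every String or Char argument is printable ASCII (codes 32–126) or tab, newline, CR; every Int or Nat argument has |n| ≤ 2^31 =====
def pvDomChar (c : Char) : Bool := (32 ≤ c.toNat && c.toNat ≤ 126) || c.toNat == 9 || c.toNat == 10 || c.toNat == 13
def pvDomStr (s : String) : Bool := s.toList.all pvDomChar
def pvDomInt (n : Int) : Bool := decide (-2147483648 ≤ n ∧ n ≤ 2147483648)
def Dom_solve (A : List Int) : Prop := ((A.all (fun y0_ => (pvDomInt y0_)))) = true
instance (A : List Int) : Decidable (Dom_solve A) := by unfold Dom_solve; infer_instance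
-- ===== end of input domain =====

-- B replaces A's running min/max window (right-to-left scan with early return) by precomputed
-- suffix-min/suffix-max tables plus a separate forward checking pass; same asymptotic cost ("alternative").

-- ===== PORT A =====
-- the loop 'for i in range(N-3, -1, -1)' visits the elements of A[0:N-2] from right to left
def loopA : List Int → Int → Int → String
  | [], _, _ => "YES"
  | x :: rest, minV, maxV =>
    if x < minV then loopA rest x maxV
    else if x > maxV then loopA rest minV x
    else "NO"

def solve (A : List Int) : String :=
  let N : Int := A.length
  match PySem.List.pyGet? A (N - 1) with
  | none => "NO"  -- IndexError in Python (A = []); excluded by Pre_solve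
  | some a1 =>
    match PySem.List.pyGet? A (N - 2) with
    | none => "NO"  -- IndexError in Python (A = []); excluded by Pre_solve
    | some a2 =>
      -- mm = (minVal, maxVal)
      let mm := if a1 > a2 then (a2, a1) else (a1, a2)
      loopA (PySem.List.slice A (some 0) (some (N - 2))).reverse mm.1 mm.2

-- ===== PORT B =====
def solve_alt (A : List Int) : String :=
  match PySem.List.pyGet? A (-1) with
  | none => "NO"  -- IndexError in Python (A = []); excluded by Pre_solve
  | some z =>
    let n : Int := A.length
    -- one loop over reversed(A[:-1]) appending to both tables (state = the pair of lists)
    let p := ((PySem.List.slice A none (some (-1))).reverse).foldl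
      (fun (acc : List Int × List Int) x =>
        (acc.1 ++ [min x (acc.1.getLastD 0)], acc.2 ++ [max x (acc.2.getLastD 0)]))
      ([z], [z])
    let sufMin := p.1.reverse
    let sufMax := p.2.reverse
    if (PySem.List.pyRange 0 (n - 2) 1).any (fun i =>
        match PySem.List.pyGet? sufMin (i + 1), PySem.List.pyGet? sufMax (i + 1),
              PySem.List.pyGet? A i with
        | some lo, some hi, some a => decide (lo ≤ a ∧ a ≤ hi)
        | _, _, _ => false)
    then "NO" else "YES"

-- ===== PRECONDITION & SPEC =====
-- Python A raises IndexError on the empty list (A[N-1] with N = 0); excluded.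
def Pre_solve (A : List Int) : Prop := A ≠ []
instance (A : List Int) : Decidable (Pre_solve A) := by unfold Pre_solve; infer_instance
def pvWitness_solve : List Int := [3, 1, 2]

def Spec_solve (A : List Int) (out : String) : Prop := out = solve_alt A
instance (A : List Int) (out : String) : Decidable (Spec_solve A out) := by unfold Spec_solve; infer_instance

-- ===== CLAIM (what is proved, stated in full; the proofs are below) =====
def Claim_equal_solve : Prop := ∀ (A : List Int), Dom_solve A → Pre_solve A → Spec_solve A (solve A)

-- ===== LEMMAS AND PROOFS =====

-- suffix table: sufF f l = [f-fold of l.drop i | i < l.length] (sufF min = suffix minima, sufF max = suffix maxima)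
def sufF (f : Int → Int → Int) : List Int → List Int
  | [] => []
  | [x] => [x]
  | x :: y :: t => f x ((sufF f (y :: t)).headD 0) :: sufF f (y :: t)

-- the per-step chain produced by B's building loop
def chain1 (f : Int → Int → Int) : List Int → Int → List Int
  | [], _ => []
  | x :: t, p => f x p :: chain1 f t (f x p)

theorem sufF_ne_nil (f : Int → Int → Int) (l : List Int) (h : l ≠ []) : sufF f l ≠ [] := by
  match l with
  | [x] => simp [sufF]
  | x :: y :: t => simp [sufF]

theorem sufF_cons (f : Int → Int → Int) (x : Int) (s : List Int) (hs : s ≠ []) :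
    sufF f (x :: s) = f x ((sufF f s).headD 0) :: sufF f s := by
  match s with
  | y :: t => rfl

theorem length_sufF (f : Int → Int → Int) (l : List Int) : (sufF f l).length = l.length := by
  match l with
  | [] => rfl
  | [x] => rfl
  | x :: y :: t => simp [sufF, length_sufF f (y :: t)]

theorem sufF_drop (f : Int → Int → Int) (l : List Int) (i : Nat) :
    (sufF f l).drop i = sufF f (l.drop i) := by
  induction l generalizing i with
  | nil => simp [sufF]
  | cons x t ih =>
    cases i with
    | zero => simp
    | succ j =>
      match t with
      | [] => simp [sufF]
      | y :: t' => simp [sufF, ih j]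

theorem sufF_min_le_max (l : List Int) (h : l ≠ []) :
    (sufF min l).headD 0 ≤ (sufF max l).headD 0 := by
  match l with
  | [x] => simp [sufF]
  | x :: y :: t =>
    have ih := sufF_min_le_max (y :: t) (by simp)
    rw [sufF_cons min x (y :: t) (by simp), sufF_cons max x (y :: t) (by simp)]
    simp only [List.headD_cons]
    exact le_trans (min_le_right _ _) (ih.trans (le_max_right _ _))

theorem chain1_append (f : Int → Int → Int) (a : List Int) (x : Int) (z : Int) :
    chain1 f (a ++ [x]) z = chain1 f a z ++ [f x ((chain1 f a z).getLastD z)] := by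
  induction a generalizing z with
  | nil => rfl
  | cons y a' ih => simp only [List.cons_append, chain1, ih, List.getLastD_cons]

theorem fold1 (l : List Int) (accm accM : List Int) (hm : accm ≠ []) (hM : accM ≠ []) :
    l.foldl (fun (acc : List Int × List Int) x =>
        (acc.1 ++ [min x (acc.1.getLastD 0)], acc.2 ++ [max x (acc.2.getLastD 0)])) (accm, accM)
      = (accm ++ chain1 min l (accm.getLastD 0), accM ++ chain1 max l (accM.getLastD 0)) := by
  induction l generalizing accm accM with
  | nil => simp [chain1]
  | cons x t ih =>
    simp only [List.foldl_cons]
    rw [ih (accm ++ [min x (accm.getLastD 0)]) (accM ++ [max x (accM.getLastD 0)]) (by simp) (by simp)]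
    simp [chain1]

theorem headD_rev_append (u : List Int) (z : Int) : (u.reverse ++ [z]).headD 0 = u.getLastD z := by
  cases h : u.getLast? with
  | none => simp_all [List.getLastD_eq_getLast?, List.headD_eq_head?_getD]
  | some v => simp_all [List.getLastD_eq_getLast?, List.headD_eq_head?_getD, List.head?_append]

theorem rev_chain (f : Int → Int → Int) (l : List Int) (z : Int) :
    (chain1 f l.reverse z).reverse ++ [z] = sufF f (l ++ [z]) := by
  induction l with
  | nil => rfl
  | cons x t ih =>
    have hne : (t ++ [z] : List Int) ≠ [] := by simp
    rw [List.reverse_cons, chain1_append, List.reverse_append, List.cons_append,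
        sufF_cons f x (t ++ [z]) hne, ← ih]
    simp only [List.reverse_singleton, List.cons_append]
    congr 2
    rw [headD_rev_append]

-- the common boolean: position i (for i < N-2) falls inside the min/max window of the suffix after it
def badAt (A : List Int) (i : Nat) : Bool :=
  decide ((sufF min (A.drop (i + 1))).headD 0 ≤ A.getD i 0 ∧
          A.getD i 0 ≤ (sufF max (A.drop (i + 1))).headD 0)

theorem any_congr_range (n : Nat) (f g : Nat → Bool) (h : ∀ i < n, f i = g i) :
    (List.range n).any f = (List.range n).any g := by
  induction n with
  | zero => rfl
  | succ m ih =>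
    rw [List.range_succ]
    simp only [List.any_append, List.any_cons, List.any_nil]
    rw [ih (fun i hi => h i (Nat.lt_succ_of_lt hi)), h m (Nat.lt_succ_self m)]

theorem goA_spec (p : List Int) : ∀ (s : List Int), s ≠ [] →
    loopA p.reverse ((sufF min s).headD 0) ((sufF max s).headD 0) =
      (if (List.range p.length).any (fun i =>
          decide ((sufF min ((p ++ s).drop (i + 1))).headD 0 ≤ p.getD i 0 ∧
                  p.getD i 0 ≤ (sufF max ((p ++ s).drop (i + 1))).headD 0))
      then "NO" else "YES") := by
  induction p using List.reverseRecOn with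
  | nil => intro s hs; simp [loopA]
  | append_singleton q x ih =>
    intro s hs
    have hlh := sufF_min_le_max s hs
    have hmin : (sufF min (x :: s)).headD 0 = min x ((sufF min s).headD 0) := by
      rw [sufF_cons min x s hs]; simp
    have hmax : (sufF max (x :: s)).headD 0 = max x ((sufF max s).headD 0) := by
      rw [sufF_cons max x s hs]; simp
    have hassoc : (q ++ [x]) ++ s = q ++ (x :: s) := by simp
    have hgx : (q ++ [x]).getD q.length 0 = x := by
      simp [List.getD]
    have hdropq : (q ++ (x :: s)).drop (q.length + 1) = s := by
      rw [show q.length + 1 = (q ++ [x]).length by simp, ← hassoc, List.drop_left]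
    have hgd : ∀ i, i < q.length → (q ++ [x]).getD i 0 = q.getD i 0 := by
      intro i hi; simp [List.getD, List.getElem?_append_left hi]
    rw [List.reverse_append, hassoc]
    simp only [List.reverse_singleton, List.singleton_append, List.length_append,
      List.length_singleton, List.range_succ, List.any_append, List.any_cons, List.any_nil]
    rw [hgx, hdropq,
      any_congr_range q.length _ _ (fun i hi => by rw [hgd i hi])]
    by_cases h1 : x < (sufF min s).headD 0
    · have hstep : loopA (x :: q.reverse) ((sufF min s).headD 0) ((sufF max s).headD 0)
          = loopA q.reverse x ((sufF max s).headD 0) := by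
        simp only [loopA]; rw [if_pos h1]
      have hcall : loopA q.reverse x ((sufF max s).headD 0)
          = loopA q.reverse ((sufF min (x :: s)).headD 0) ((sufF max (x :: s)).headD 0) := by
        rw [hmin, hmax, min_eq_left h1.le, max_eq_right (h1.le.trans hlh)]
      have hlast : decide ((sufF min s).headD 0 ≤ x ∧ x ≤ (sufF max s).headD 0) = false :=
        decide_eq_false_iff_not.mpr (fun h => absurd h.1 (not_le.mpr h1))
      rw [hstep, hcall, ih (x :: s) (by simp), hlast]
      simp
    · by_cases h2 : x > (sufF max s).headD 0
      · have hstep : loopA (x :: q.reverse) ((sufF min s).headD 0) ((sufF max s).headD 0)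
            = loopA q.reverse ((sufF min s).headD 0) x := by
          simp only [loopA]; rw [if_neg h1, if_pos h2]
        have hcall : loopA q.reverse ((sufF min s).headD 0) x
            = loopA q.reverse ((sufF min (x :: s)).headD 0) ((sufF max (x :: s)).headD 0) := by
          rw [hmin, hmax, min_eq_right (hlh.trans h2.le), max_eq_left h2.le]
        have hlast : decide ((sufF min s).headD 0 ≤ x ∧ x ≤ (sufF max s).headD 0) = false :=
          decide_eq_false_iff_not.mpr (fun h => absurd h.2 (not_le.mpr h2))
        rw [hstep, hcall, ih (x :: s) (by simp), hlast]
        simp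
      · have hstep : loopA (x :: q.reverse) ((sufF min s).headD 0) ((sufF max s).headD 0)
            = "NO" := by
          simp only [loopA]; rw [if_neg h1, if_neg h2]
        have hlast : decide ((sufF min s).headD 0 ≤ x ∧ x ≤ (sufF max s).headD 0) = true :=
          decide_eq_true ⟨not_lt.mp h1, not_lt.mp h2⟩
        rw [hstep, hlast]
        simp

theorem head?_eq_some_headD (l : List Int) (h : l ≠ []) : l.head? = some (l.headD 0) := by
  cases l with
  | nil => exact absurd rfl h
  | cons a t => rfl

theorem solveA_eq (A : List Int) (h : A ≠ []) :
    solve A = if (List.range (A.length - 2)).any (badAt A) then "NO" else "YES" := by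
  obtain ⟨q, v, rfl⟩ := (A.eq_nil_or_concat).resolve_left h
  rcases q.eq_nil_or_concat with rfl | ⟨p, u, rfl⟩
  · simp [solve, loopA, PySem.List.pyGet?_neg_one, PySem.List.slice_to_neg_one]
  · have hA : (p.concat u).concat v = p ++ [u, v] := by simp
    rw [hA]
    have hlen : ((p ++ [u, v]).length : Int) = (p.length : Int) + 2 := by simp
    have hg1 : PySem.List.pyGet? (p ++ [u, v]) (((p ++ [u, v]).length : Int) - 1)
        = some v := by
      rw [hlen, show (p.length : Int) + 2 - 1 = (((p ++ [u]).length : Nat) : Int) by simp; ring]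
      rw [PySem.List.pyGet?_natCast]
      simp
    have hg2 : PySem.List.pyGet? (p ++ [u, v]) (((p ++ [u, v]).length : Int) - 2)
        = some u := by
      rw [hlen, show (p.length : Int) + 2 - 2 = ((p.length : Nat) : Int) by ring]
      rw [PySem.List.pyGet?_natCast]
      simp
    have hslice : PySem.List.slice (p ++ [u, v]) (some 0)
        (some (((p ++ [u, v]).length : Int) - 2)) = p := by
      rw [hlen, show (p.length : Int) + 2 - 2 = ((p.length : Nat) : Int) by ring,
        PySem.List.slice_zero_start, PySem.List.slice_to_natCast]
      simp
    have hsmin : (sufF min [u, v]).headD 0 = min u v := by simp [sufF]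
    have hsmax : (sufF max [u, v]).headD 0 = max u v := by simp [sufF]
    have hlen2 : (p ++ [u, v]).length - 2 = p.length := by simp
    have hgd : ∀ i, i < p.length → (p ++ [u, v]).getD i 0 = p.getD i 0 := by
      intro i hi; simp [List.getD, List.getElem?_append_left hi]
    have hmm : (if v > u then (u, v) else (v, u))
        = ((sufF min [u, v]).headD 0, (sufF max [u, v]).headD 0) := by
      rw [hsmin, hsmax]
      by_cases huv : v > u
      · rw [if_pos huv, min_eq_left huv.le, max_eq_right huv.le]
      · rw [if_neg huv, min_eq_right (not_lt.mp huv), max_eq_left (not_lt.mp huv)]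
    show (match PySem.List.pyGet? (p ++ [u, v]) (((p ++ [u, v]).length : Int) - 1) with
      | none => "NO"
      | some a1 =>
        match PySem.List.pyGet? (p ++ [u, v]) (((p ++ [u, v]).length : Int) - 2) with
        | none => "NO"
        | some a2 =>
          let mm := if a1 > a2 then (a2, a1) else (a1, a2)
          loopA (PySem.List.slice (p ++ [u, v]) (some 0)
            (some (((p ++ [u, v]).length : Int) - 2))).reverse mm.1 mm.2) = _
    rw [hg1, hg2, hslice, hlen2]
    simp only [hmm]
    rw [goA_spec p [u, v] (by simp),
      any_congr_range p.length _ (badAt (p ++ [u, v]))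
        (fun i hi => by unfold badAt; rw [hgd i hi])]

theorem solveB_eq (A : List Int) (h : A ≠ []) :
    solve_alt A = if (List.range (A.length - 2)).any (badAt A) then "NO" else "YES" := by
  obtain ⟨q, z, rfl⟩ := (A.eq_nil_or_concat).resolve_left h
  have hA : q.concat z = q ++ [z] := by simp
  rw [hA]
  have hg : PySem.List.pyGet? (q ++ [z]) (-1) = some z :=
    PySem.List.pyGet?_neg_one_append_singleton q z
  have hsl : PySem.List.slice (q ++ [z]) none (some (-1)) = q := by
    rw [PySem.List.slice_to_neg_one]; simp
  have hfold := fold1 q.reverse [z] [z] (by simp) (by simp)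
  have hrevm := rev_chain min q z
  have hrevM := rev_chain max q z
  simp only [solve_alt, hg, hsl, hfold]
  have hsm : ([z] ++ chain1 min q.reverse ([z].getLastD 0)).reverse = sufF min (q ++ [z]) := by
    rw [show ([z].getLastD 0) = z from rfl]
    rw [← hrevm]; simp
  have hsM : ([z] ++ chain1 max q.reverse ([z].getLastD 0)).reverse = sufF max (q ++ [z]) := by
    rw [show ([z].getLastD 0) = z from rfl]
    rw [← hrevM]; simp
  rw [hsm, hsM, PySem.List.pyRange_one]
  have hn : ((((q ++ [z]).length : Int)) - 2 - 0).toNat = (q ++ [z]).length - 2 := by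
    simp; omega
  rw [hn, List.any_map]
  have hper : ∀ k, k < (q ++ [z]).length - 2 →
      ((fun i =>
          match PySem.List.pyGet? (sufF min (q ++ [z])) (i + 1),
            PySem.List.pyGet? (sufF max (q ++ [z])) (i + 1),
            PySem.List.pyGet? (q ++ [z]) i with
          | some lo, some hi, some a => decide (lo ≤ a ∧ a ≤ hi)
          | _, _, _ => false) ∘ (fun k : Nat => (0 : Int) + ↑k)) k
        = badAt (q ++ [z]) k := by
    intro k hk
    simp only [List.length_append, List.length_singleton] at hk
    have hkL : k < (q ++ [z]).length := by simp; omega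
    have e1 : ∀ f : Int → Int → Int, PySem.List.pyGet? (sufF f (q ++ [z])) ((0 : Int) + ↑k + 1)
        = some ((sufF f ((q ++ [z]).drop (k + 1))).headD 0) := by
      intro f
      rw [show ((0 : Int) + ↑k + 1) = ((k + 1 : Nat) : Int) by push_cast; ring,
        PySem.List.pyGet?_natCast, ← List.head?_drop, sufF_drop,
        head?_eq_some_headD _ (sufF_ne_nil f _ (by simp [List.drop_eq_nil_iff]; omega))]
    have e2 : PySem.List.pyGet? (q ++ [z]) ((0 : Int) + ↑k)
        = some ((q ++ [z]).getD k 0) := by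
      rw [show ((0 : Int) + ↑k) = ((k : Nat) : Int) by ring,
        PySem.List.pyGet?_natCast, List.getElem?_eq_getElem hkL]
      simp [List.getD, List.getElem?_eq_getElem hkL]
    simp only [Function.comp_apply, e1 min, e1 max, e2]
    rfl
  rw [any_congr_range _ _ (badAt (q ++ [z])) hper]

-- ===== VERDICT (by name: the statement is the Claim_ definition above) =====
theorem solve_spec : Claim_equal_solve := by
  intro A _ hpre
  unfold Spec_solve
  rw [solveA_eq A hpre, solveB_eq A hpre]
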